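-- pv_equiv track=rewrite | github.com/HaorongYuan/f1tenth_car_ws | src/car_navigation/roboracer_china_2025/roboracer_china_2025/battle_fast2_node.py | fill_zeros_with_neighbors
-- ===== SOURCE A (Python) =====
-- def fill_zeros_with_neighbors(data):
--     result = list(data)
--     n = len(result)
--
--     for i in range(n):
--         if result[i] == 0:
--             left = next((result[j] for j in range(i - 1, -1, -1) if result[j] != 0), None)
--             if left is not None:
--                 result[i] = left
--                 continue
--
--             right = next((result[j] for j in range(i + 1, n) if result[j] != 0), None)
--             if right is not None:
--                 result[i] = right
--                 continue
--
--             result[i] = 0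
--     return result
-- ===== SOURCE B (Python) =====
-- def fill_zeros_with_neighbors(data):
--     # Single forward pass: track the last non-zero value seen; leading zeros
--     # take the first non-zero value of the list (0 if the list is all zeros).
--     last = next((x for x in data if x != 0), 0)
--     out = []
--     for x in data:
--         if x != 0:
--             last = x
--         out.append(last)
--     return out
-- ===== Notes on version B (the rewrite author's own statement) =====
-- stated objective: simpler
-- what changed: Replaced the per-zero bidirectional index scans over the mutated list with a single forward pass that tracks the last non-zero value (seeded with the first non-zero value for leading zeros).
import Mathlib
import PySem

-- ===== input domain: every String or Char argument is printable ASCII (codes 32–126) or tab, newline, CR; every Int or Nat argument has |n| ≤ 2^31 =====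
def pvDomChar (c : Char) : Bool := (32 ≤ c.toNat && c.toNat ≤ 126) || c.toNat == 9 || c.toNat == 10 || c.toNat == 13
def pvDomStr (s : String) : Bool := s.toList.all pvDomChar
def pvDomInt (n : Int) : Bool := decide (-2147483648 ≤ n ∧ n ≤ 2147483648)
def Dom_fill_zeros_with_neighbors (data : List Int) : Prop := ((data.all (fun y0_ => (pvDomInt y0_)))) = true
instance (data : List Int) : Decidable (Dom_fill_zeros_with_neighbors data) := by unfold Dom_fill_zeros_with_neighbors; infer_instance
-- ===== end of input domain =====

-- B replaces A's per-zero bidirectional neighbor scans with one forward pass tracking the last non-zero value (objective: simpler).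


-- ===== PORT A =====
-- the generator expression 'next((result[j] for j in <js> if result[j] != 0), None)'
def pvScan (result : List Int) (js : List Int) : Option Int :=
  js.findSome? (fun j => (PySem.List.pyGet? result j).bind (fun v => if v != 0 then some v else none))

def pvStep (n : Int) (result : List Int) (i : Int) : List Int :=
  if PySem.List.pyGetD result i 0 = 0 then
    match pvScan result (PySem.List.pyRange (i - 1) (-1) (-1)) with
    | some left => PySem.List.pySetD result i left
    | none =>
      match pvScan result (PySem.List.pyRange (i + 1) n 1) with
      | some right => PySem.List.pySetD result i right
      | none => PySem.List.pySetD result i 0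
  else result

def fill_zeros_with_neighbors (data : List Int) : List Int :=
  let result := data
  let n : Int := result.length
  (PySem.List.pyRange 0 n 1).foldl (pvStep n) result

-- ===== PORT B =====
def fill_zeros_with_neighbors_alt (data : List Int) : List Int :=
  -- last = next((x for x in data if x != 0), 0)
  let first : Int := match data.find? (fun x => x != 0) with | some v => v | none => 0
  ((data.foldl (fun (st : List Int × Int) x =>
      let last := if x != 0 then x else st.2
      (st.1 ++ [last], last)) ([], first))).1

-- ===== PRECONDITION & SPEC =====
def Spec_fill_zeros_with_neighbors (data : List Int) (out : List Int) : Prop := out = fill_zeros_with_neighbors_alt data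
instance (data : List Int) (out : List Int) : Decidable (Spec_fill_zeros_with_neighbors data out) := by unfold Spec_fill_zeros_with_neighbors; infer_instance

-- ===== CLAIM (what is proved, stated in full; the proofs are below) =====
def Claim_equal_fill_zeros_with_neighbors : Prop := ∀ (data : List Int), Dom_fill_zeros_with_neighbors data → Spec_fill_zeros_with_neighbors data (fill_zeros_with_neighbors data)

-- ===== LEMMAS AND PROOFS =====

-- reference single pass: go l xs fills zeros with the running value l
def pvGo (l : Int) : List Int → List Int
  | [] => []
  | x :: xs => let l' := if x != 0 then x else l; l' :: pvGo l' xs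

-- B's foldl equals pvGo
lemma pvAlt_eq_go (xs : List Int) : ∀ (acc : List Int) (l : Int),
    (xs.foldl (fun (st : List Int × Int) x =>
      let last := if x != 0 then x else st.2
      (st.1 ++ [last], last)) (acc, l)).1 = acc ++ pvGo l xs := by
  induction xs with
  | nil => intro acc l; simp [pvGo]
  | cons x xs ih =>
    intro acc l
    simp only [List.foldl_cons, pvGo]
    rw [ih]
    simp [List.append_assoc]

-- pvScan over the right range finds the first non-zero of the suffix
lemma pvScan_right (xs : List Int) : ∀ (pre : List Int),
    pvScan (pre ++ xs) (PySem.List.pyRange pre.length (pre.length + xs.length) 1)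
      = xs.find? (fun v => v != 0) := by
  induction xs with
  | nil => intro pre; simp [pvScan, PySem.List.pyRange_one_eq_nil]
  | cons y ys ih =>
    intro pre
    rw [PySem.List.pyRange_one_cons (by simp only [List.length_cons]; push_cast; omega)]
    by_cases h : y = 0
    · subst h
      have key := ih (pre ++ [0])
      simp only [List.length_append, List.length_singleton, List.append_assoc,
        List.singleton_append] at key
      have e1 : ((pre.length : Int)) + 1 = (((pre.length + 1 : Nat)) : Int) := by push_cast; ring
      have e2 : ((pre.length : Int)) + ((((0:Int) :: ys).length : Nat) : Int)
          = (((pre.length + 1 : Nat)) : Int) + (ys.length : Int) := by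
        simp only [List.length_cons]; push_cast; ring
      simp only [pvScan, List.findSome?_cons, PySem.List.pyGet?_append_length] at key ⊢
      rw [e1, e2]
      simpa using key
    · simp only [pvScan, List.findSome?_cons, PySem.List.pyGet?_append_length]
      simp [h]

-- the left scan finds the last element of a non-empty all-non-zero prefix immediately
lemma pvScan_left (done rest : List Int) (l : Int) (hne : done ≠ [])
    (hlast : done.getLast? = some l) (hl : l ≠ 0) :
    pvScan (done ++ rest) (PySem.List.pyRange ((done.length : Int) - 1) (-1) (-1)) = some l := by
  rw [PySem.List.pyRange_neg_one_cons (by have := List.length_pos_iff.mpr hne; omega)]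
  have hlen : done.length - 1 < done.length := by
    have := List.length_pos_iff.mpr hne; omega
  have hget : PySem.List.pyGet? (done ++ rest) ((done.length : Int) - 1) = some l := by
    rw [PySem.List.pyGet?_of_nonneg _ (by have := List.length_pos_iff.mpr hne; omega)]
    have ht : ((done.length : Int) - 1).toNat = done.length - 1 := by omega
    rw [ht, List.getElem?_append_left hlen]
    rw [List.getLast?_eq_some_iff] at hlast
    obtain ⟨ys, hys⟩ := hlast
    subst hys
    simp
  simp [pvScan, hget, hl]

lemma pvGetD_mid (done : List Int) (r : Int) (rs : List Int) :
    PySem.List.pyGetD (done ++ r :: rs) (done.length : Int) 0 = r := by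
  rw [PySem.List.pyGetD_eq_getElem _ 0 (by omega) (by simp only [List.length_append, List.length_cons]; push_cast; omega)]
  simp

lemma pvSet_mid (done : List Int) (r v : Int) (rs : List Int) :
    PySem.List.pySetD (done ++ r :: rs) (done.length : Int) v = done ++ v :: rs := by
  rw [PySem.List.pySetD_of_nonneg _ v (by omega)]
  simp

-- main invariant: once a non-empty all-non-zero prefix is done, the loop acts like pvGo
lemma pvMain (rest : List Int) : ∀ (done : List Int) (l : Int), done ≠ [] →
    (∀ y ∈ done, y ≠ 0) → done.getLast? = some l →
    (PySem.List.pyRange (done.length : Int)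
        ((done.length : Int) + (rest.length : Int)) 1).foldl
      (pvStep ((done.length : Int) + (rest.length : Int))) (done ++ rest)
      = done ++ pvGo l rest := by
  induction rest with
  | nil => intro done l _ _ _; simp [PySem.List.pyRange_one_eq_nil, pvGo]
  | cons r rs ih =>
    intro done l hne hnz hlast
    have hl : l ≠ 0 := hnz l (List.mem_of_getLast? hlast)
    rw [PySem.List.pyRange_one_cons (by simp only [List.length_cons]; push_cast; omega)]
    rw [List.foldl_cons]
    have hstep : pvStep ((done.length : Int) + ((r :: rs).length : Int)) (done ++ r :: rs) (done.length : Int)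
        = done ++ (if r != 0 then r else l) :: rs := by
      unfold pvStep
      by_cases hr : r = 0
      · rw [pvGetD_mid]
        rw [pvScan_left done (r :: rs) l hne hlast hl]
        simp [hr]
      · rw [pvGetD_mid]
        simp [hr]
    rw [hstep]
    set l' := if r != 0 then r else l with hl'
    have hl'nz : l' ≠ 0 := by by_cases hr : r = 0 <;> simp [hl', hr, hl]
    have heq := ih (done ++ [l']) l' (by simp) (by
        intro y hy
        rcases List.mem_append.mp hy with h | h
        · exact hnz y h
        · simp at h; omega) (by simp)
    simp only [List.length_append, List.length_singleton] at heq
    push_cast at heq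
    have hend : (done.length : Int) + ((r :: rs).length : Int)
        = (done.length : Int) + 1 + (rs.length : Int) := by
      simp only [List.length_cons]; push_cast; ring
    rw [hend]
    rw [show done ++ l' :: rs = done ++ [l'] ++ rs from by simp, heq]
    by_cases hr : r = 0 <;> simp [pvGo, hl', hr, List.append_assoc]

-- all-zero inputs: every step is the identity
lemma pvStep_allzero (result : List Int) (hz : ∀ y ∈ result, y = 0) (n i : Int) :
    pvStep n result i = result := by
  have hscan : ∀ js, pvScan result js = none := by
    intro js
    simp only [pvScan, List.findSome?_eq_none_iff]
    intro j _
    cases hg : PySem.List.pyGet? result j with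
    | none => simp
    | some v =>
      have := hz v (PySem.List.mem_of_pyGet?_eq_some _ hg)
      simp [this]
  have hset : ∀ i : Int, PySem.List.pySetD result i 0 = result := by
    intro i
    unfold PySem.List.pySetD
    cases h : PySem.List.pySet? result i 0 with
    | none => rfl
    | some r =>
      simp only [Option.getD_some]
      have hex : ∃ k, r = result.set k 0 := by
        unfold PySem.List.pySet? at h
        cases hk : PySem.List.pyIdx? result.length i with
        | none => rw [hk] at h; simp at h
        | some k => rw [hk] at h; simp at h; exact ⟨k, h.symm⟩
      obtain ⟨k, hr⟩ := hex
      subst hr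
      apply List.ext_getElem (by simp)
      intro m h1 h2
      rw [List.getElem_set]
      by_cases hkm : k = m
      · simp [hkm, hz result[m] (by simp)]
      · simp [hkm]
  have hcond : PySem.List.pyGetD result i 0 = 0 := by
    unfold PySem.List.pyGetD
    cases hg : PySem.List.pyGet? result i with
    | none => rfl
    | some v => exact hz v (PySem.List.mem_of_pyGet?_eq_some _ hg)
  unfold pvStep
  rw [hcond]
  simp [hscan, hset]

lemma pvGo_zero (xs : List Int) (hz : ∀ y ∈ xs, y = 0) : pvGo 0 xs = xs := by
  induction xs with
  | nil => rfl
  | cons x xs ih =>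
    have hx := hz x (by simp)
    simp [pvGo, hx, ih (fun y hy => hz y (by simp [hy]))]

-- ===== VERDICT (by name: the statement is the Claim_ definition above) =====
theorem fill_zeros_with_neighbors_spec : Claim_equal_fill_zeros_with_neighbors := by
  intro data _
  unfold Spec_fill_zeros_with_neighbors fill_zeros_with_neighbors fill_zeros_with_neighbors_alt
  rw [pvAlt_eq_go]
  simp only [List.nil_append]
  cases hfind : data.find? (fun x => x != 0) with
  | none =>
    have hz : ∀ y ∈ data, y = 0 := by
      intro y hy
      have := List.find?_eq_none.mp hfind y hy
      simpa using this
    have hid : ∀ js : List Int, js.foldl (pvStep (data.length : Int)) data = data := by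
      intro js
      induction js with
      | nil => rfl
      | cons j js ihj => rw [List.foldl_cons, pvStep_allzero data hz, ihj]
    rw [hid, pvGo_zero data hz]
  | some v =>
    have hv : v ≠ 0 := by
      have := List.find?_some hfind
      simpa using this
    cases data with
    | nil => simp at hfind
    | cons x xs =>
      rw [PySem.List.pyRange_one_cons (by simp only [List.length_cons]; push_cast; omega)]
      rw [List.foldl_cons]
      by_cases hx : x = 0
      · -- leading zero: left scan empty, right scan finds v = first non-zero of xs
        subst hx
        have hfx : xs.find? (fun x => x != 0) = some v := by
          simpa using hfind
        have hstep : pvStep (((0:Int) :: xs).length : Int) ((0:Int) :: xs) 0 = v :: xs := by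
          unfold pvStep
          have h1 : PySem.List.pyGetD ((0:Int) :: xs) 0 0 = 0 := by simp [PySem.List.pyGetD_zero_cons]
          have h2 : pvScan ((0:Int) :: xs) (PySem.List.pyRange (0 - 1) (-1) (-1)) = none := by
            simp [pvScan, PySem.List.pyRange_neg_one_eq_nil]
          have h3 : pvScan ((0:Int) :: xs) (PySem.List.pyRange (0 + 1) (((0:Int) :: xs).length : Int) 1) = some v := by
            have key := pvScan_right xs [(0:Int)]
            rw [hfx] at key
            simp only [List.singleton_append] at key
            rw [show ((0:Int) + 1) = (([(0:Int)].length : Nat) : Int) from by simp,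
                show ((((0:Int) :: xs).length : Nat) : Int) = (([(0:Int)].length : Nat) : Int) + (xs.length : Int) from by
                  simp only [List.length_cons, List.length_nil]; push_cast; ring]
            exact key
          rw [h1, if_pos rfl, h2, h3]
          have := pvSet_mid [] 0 v xs
          simpa using this
        rw [hstep]
        have := pvMain xs [v] v (by simp) (by simpa using hv) (by simp)
        simp only [List.length_singleton, List.singleton_append, Nat.cast_one] at this
        rw [show ((((0:Int) :: xs).length : Nat) : Int) = (1 : Int) + (xs.length : Int) from by simp only [List.length_cons]; push_cast; ring]
        rw [show ((0:Int) + 1) = (1:Int) from by norm_num]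
        rw [this]
        simp [pvGo]
      · -- non-zero head: step is the identity, v = x
        have hvx : v = x := by
          rw [List.find?_cons_of_pos (by simpa using hx)] at hfind
          exact (Option.some.injEq _ _ ▸ hfind.symm)
        have hstep : pvStep ((x :: xs).length : Int) (x :: xs) 0 = x :: xs := by
          unfold pvStep
          simp [PySem.List.pyGetD_zero_cons, hx]
        rw [hstep]
        have := pvMain xs [x] x (by simp) (by simpa using hx) (by simp)
        simp only [List.length_singleton, List.singleton_append, Nat.cast_one] at this
        rw [show (((x :: xs).length : Nat) : Int) = (1 : Int) + (xs.length : Int) from by simp only [List.length_cons]; push_cast; ring]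
        rw [show ((0:Int) + 1) = (1:Int) from by norm_num]
        rw [this]
        simp [pvGo, hx]
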